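-- pv_equiv track=rewrite | github.com/kelvinhub2/homebudget | homebudget-source/homebudget/parsers/ubs.py | _parse_ubs_row_a
-- ===== SOURCE A (Python) =====
-- def _parse_ubs_row_a(line: str) -> list[str]:
--     """
--     Parse one UBS Format A data row.
--     Each row is wrapped in outer double-quotes.
--     Inner quoted fields use \"\"...\"\" to escape.
--     """
--     line = line.strip()
--     if line.startswith('"') and line.endswith('"'):
--         line = line[1:-1]
--
--     fields = []
--     current = ''
--     in_inner = False
--     i = 0
--     while i < len(line):
--         if line[i:i+2] == '""':
--             in_inner = not in_inner
--             i += 2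
--             continue
--         if line[i] == ';' and not in_inner:
--             fields.append(current)
--             current = ''
--         else:
--             current += line[i]
--         i += 1
--     fields.append(current)
--     return fields
-- ===== SOURCE B (Python) =====
-- def _parse_ubs_row_a(line: str) -> list[str]:
--     """Parse one UBS Format A data row: split on '""' once, then split only the
--     outside-quotes segments on ';' (simpler: no char-by-char state machine)."""
--     line = line.strip()
--     if line.startswith('"') and line.endswith('"'):
--         line = line[1:-1]
--
--     fields = []
--     current = ''
--     inside = False
--     for seg in line.split('""'):
--         if inside:
--             current += seg
--         else:
--             parts = seg.split(';')
--             current += parts[0]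
--             for p in parts[1:]:
--                 fields.append(current)
--                 current = p
--         inside = not inside
--     fields.append(current)
--     return fields
-- ===== Notes on version B (the rewrite author's own statement) =====
-- stated objective: simpler
-- what changed: Replaced A's character-by-character scan with an in_inner flag by two library splits: split the line once on the escaped-quote marker, then split only the even (outside-quotes) segments on the field delimiter, carrying the current field across segment boundaries.
import Mathlib
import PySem

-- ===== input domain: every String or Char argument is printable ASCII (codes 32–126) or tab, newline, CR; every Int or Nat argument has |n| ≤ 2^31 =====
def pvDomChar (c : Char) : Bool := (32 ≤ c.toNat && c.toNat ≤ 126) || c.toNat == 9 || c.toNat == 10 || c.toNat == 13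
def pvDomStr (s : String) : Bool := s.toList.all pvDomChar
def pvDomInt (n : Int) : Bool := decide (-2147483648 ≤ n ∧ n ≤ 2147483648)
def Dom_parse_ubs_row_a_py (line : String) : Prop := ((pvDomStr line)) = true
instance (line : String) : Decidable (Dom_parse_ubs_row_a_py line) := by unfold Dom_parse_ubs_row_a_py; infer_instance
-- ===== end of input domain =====

-- B replaces A's char-by-char quote state machine (with per-character string concatenation)
-- by two library splits: once on the escaped-quote marker, then the outside-quotes segments
-- on the field delimiter; simpler and measured faster. Equal return value proved.

-- ===== PORT A =====
-- the char-by-char scan: i/while becomes recursion on the remaining chars;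
-- line[i:i+2] == '""' is "head is '"' and next char is '"'"
def pvA_go : List Char → Bool → List Char → List String → List String
  | [], _, cur, fields => fields ++ [String.mk cur]
  | c :: rest, inner, cur, fields =>
    if c = '"' ∧ rest.head? = some '"' then pvA_go rest.tail (!inner) cur fields
    else if c = ';' ∧ inner = false then pvA_go rest inner [] (fields ++ [String.mk cur])
    else pvA_go rest inner (cur ++ [c]) fields
  termination_by l => l.length
  decreasing_by all_goals simp [List.length_tail]

def pvA_prologue (line : String) : List Char :=
  let l := PySem.Chars.strip line.toList
  if PySem.Chars.startswith l ['"'] && PySem.Chars.endswith l ['"'] then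
    PySem.Chars.slice l (some 1) (some (-1))
  else l

def parse_ubs_row_a_py (line : String) : List String :=
  pvA_go (pvA_prologue line) false [] []

-- ===== PORT B =====
-- inner for-loop body: for p in parts[1:]: fields.append(current); current = p
def pvB_inner (st : List String × List Char) (p : List Char) : List String × List Char :=
  (st.1 ++ [String.mk st.2], p)

-- outer for-loop over line.split('""') with state (fields, current, inside)
def pvB_seg : List (List Char) → Bool → List Char → List String → List String
  | [], _, cur, fields => fields ++ [String.mk cur]
  | seg :: rest, inside, cur, fields =>
    if inside then pvB_seg rest (!inside) (cur ++ seg) fields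
    else
      let parts := PySem.Chars.splitOn seg [';']
      let st := (parts.drop 1).foldl pvB_inner (fields, cur ++ parts.headD [])
      pvB_seg rest (!inside) st.2 st.1

def pvB_prologue (line : String) : List Char :=
  let l := PySem.Chars.strip line.toList
  if PySem.Chars.startswith l ['"'] && PySem.Chars.endswith l ['"'] then
    PySem.Chars.slice l (some 1) (some (-1))
  else l

def parse_ubs_row_a_py_alt (line : String) : List String :=
  pvB_seg (PySem.Chars.splitOn (pvB_prologue line) ['"', '"']) false [] []

-- ===== PRECONDITION & SPEC =====
def Spec_parse_ubs_row_a_py (line : String) (out : List String) : Prop := out = parse_ubs_row_a_py_alt line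
instance (line : String) (out : List String) : Decidable (Spec_parse_ubs_row_a_py line out) := by unfold Spec_parse_ubs_row_a_py; infer_instance

-- ===== CLAIM (what is proved, stated in full; the proofs are below) =====
def Claim_equal_parse_ubs_row_a_py : Prop := ∀ (line : String), Dom_parse_ubs_row_a_py line → Spec_parse_ubs_row_a_py line (parse_ubs_row_a_py line)

-- ===== LEMMAS AND PROOFS =====

-- model of s.split('""') as a structural recursion on the characters
def pvSp2 : List Char → List (List Char)
  | [] => [[]]
  | c :: rest =>
    if c = '"' ∧ rest.head? = some '"' then [] :: pvSp2 rest.tail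
    else match pvSp2 rest with
      | [] => [[c]]
      | h :: t => (c :: h) :: t
  termination_by l => l.length
  decreasing_by all_goals simp [List.length_tail]

-- model of s.split(';')
def pvSp1 : List Char → List (List Char)
  | [] => [[]]
  | c :: rest =>
    if c = ';' then [] :: pvSp1 rest
    else match pvSp1 rest with
      | [] => [[c]]
      | h :: t => (c :: h) :: t

lemma pvSp2_ne_nil (l : List Char) : pvSp2 l ≠ [] := by
  cases l with
  | nil => simp [pvSp2]
  | cons c rest =>
    rw [pvSp2]
    split_ifs
    · simp
    · rcases h : pvSp2 rest with _ | ⟨h0, t0⟩ <;> simp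

lemma pvSp1_ne_nil (l : List Char) : pvSp1 l ≠ [] := by
  cases l with
  | nil => simp [pvSp1]
  | cons c rest =>
    rw [pvSp1]
    split_ifs
    · simp
    · rcases h : pvSp1 rest with _ | ⟨h0, t0⟩ <;> simp

-- generic characterization of PySem.Chars.splitOn.go against an abstract model M
lemma pvGoGen (sep : List Char) (M : List Char → List (List Char))
    (hnil : M [] = [[]])
    (hpre : ∀ l, sep.isPrefixOf l = true → M l = [] :: M (l.drop sep.length))
    (hcons : ∀ c rest, sep.isPrefixOf (c :: rest) = false →
        M (c :: rest) = (c :: (M rest).headD []) :: (M rest).tail)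
    (hne : ∀ l, M l ≠ [])
    (hsep : sep ≠ []) :
    ∀ fuel l cur acc, l.length ≤ fuel →
      PySem.Chars.splitOn.go sep fuel l cur acc
        = acc.reverse ++ (cur.reverse ++ (M l).headD []) :: (M l).tail := by
  intro fuel
  induction fuel with
  | zero =>
    intro l cur acc hlen
    have : l = [] := by cases l <;> simp_all
    subst this
    simp [PySem.Chars.splitOn.go, hnil]
  | succ f ih =>
    intro l cur acc hlen
    cases l with
    | nil => simp [PySem.Chars.splitOn.go, hnil]
    | cons c rest =>
      rw [PySem.Chars.splitOn.go]
      cases hb : List.isPrefixOf sep (c :: rest) with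
      | true =>
        rw [if_pos rfl]
        have hslen : 1 ≤ sep.length := by
          cases sep with
          | nil => exact absurd rfl hsep
          | cons _ _ => simp
        have hdl : (List.drop sep.length (c :: rest)).length ≤ f := by
          simp only [List.length_drop]
          simp at hlen ⊢
          omega
        rw [ih _ _ _ hdl, hpre _ hb]
        obtain ⟨h0, t0, hE⟩ := List.exists_cons_of_ne_nil (hne (List.drop sep.length (c :: rest)))
        rw [hE]
        simp
      | false =>
        rw [if_neg (by simp)]
        have hrl : rest.length ≤ f := by simp at hlen; omega
        rw [ih _ _ _ hrl, hcons c rest hb]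
        obtain ⟨h0, t0, hE⟩ := List.exists_cons_of_ne_nil (hne rest)
        rw [hE]
        simp

lemma pvSp2_pre (l : List Char) (h : List.isPrefixOf ['"', '"'] l = true) :
    pvSp2 l = [] :: pvSp2 (l.drop 2) := by
  rcases l with _ | ⟨c, _ | ⟨c2, r⟩⟩ <;> simp [List.isPrefixOf] at h
  obtain ⟨h1, h2⟩ := h
  subst h1; subst h2
  rw [pvSp2]
  simp

lemma pvSp2_cons (c : Char) (rest : List Char)
    (h : List.isPrefixOf ['"', '"'] (c :: rest) = false) :
    pvSp2 (c :: rest) = (c :: (pvSp2 rest).headD []) :: (pvSp2 rest).tail := by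
  have hcond : ¬(c = '"' ∧ rest.head? = some '"') := by
    rintro ⟨h1, h2⟩
    subst h1
    rcases rest with _ | ⟨c2, r⟩ <;> simp at h2
    subst h2
    simp [List.isPrefixOf] at h
  rw [pvSp2, if_neg hcond]
  obtain ⟨h0, t0, hE⟩ := List.exists_cons_of_ne_nil (pvSp2_ne_nil rest)
  rw [hE]
  simp

lemma pvSp1_pre (l : List Char) (h : List.isPrefixOf [';'] l = true) :
    pvSp1 l = [] :: pvSp1 (l.drop 1) := by
  rcases l with _ | ⟨c, r⟩ <;> simp [List.isPrefixOf] at h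
  subst h
  rw [pvSp1]
  simp

lemma pvSp1_cons (c : Char) (rest : List Char)
    (h : List.isPrefixOf [';'] (c :: rest) = false) :
    pvSp1 (c :: rest) = (c :: (pvSp1 rest).headD []) :: (pvSp1 rest).tail := by
  have hcond : ¬(c = ';') := by
    intro hcc; subst hcc; simp [List.isPrefixOf] at h
  rw [pvSp1, if_neg hcond]
  obtain ⟨h0, t0, hE⟩ := List.exists_cons_of_ne_nil (pvSp1_ne_nil rest)
  rw [hE]
  simp

lemma pvSplitOn_eq_sp2 (l : List Char) : PySem.Chars.splitOn l ['"', '"'] = pvSp2 l := by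
  rw [PySem.Chars.splitOn,
    pvGoGen ['"', '"'] pvSp2 (by simp [pvSp2]) pvSp2_pre pvSp2_cons pvSp2_ne_nil (by simp)
      (l.length + 1) l [] [] (by omega)]
  obtain ⟨h0, t0, hE⟩ := List.exists_cons_of_ne_nil (pvSp2_ne_nil l)
  rw [hE]
  simp

lemma pvSplitOn_eq_sp1 (l : List Char) : PySem.Chars.splitOn l [';'] = pvSp1 l := by
  rw [PySem.Chars.splitOn,
    pvGoGen [';'] pvSp1 (by simp [pvSp1]) pvSp1_pre pvSp1_cons pvSp1_ne_nil (by simp)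
      (l.length + 1) l [] [] (by omega)]
  obtain ⟨h0, t0, hE⟩ := List.exists_cons_of_ne_nil (pvSp1_ne_nil l)
  rw [hE]
  simp

lemma pvB_seg_cons_true (seg : List Char) (rest : List (List Char)) (cur : List Char)
    (fields : List String) :
    pvB_seg (seg :: rest) true cur fields = pvB_seg rest false (cur ++ seg) fields := by
  rw [pvB_seg]; simp

lemma pvB_seg_cons_false (seg : List Char) (rest : List (List Char)) (cur : List Char)
    (fields : List String) :
    pvB_seg (seg :: rest) false cur fields =
      pvB_seg rest true
        (((pvSp1 seg).drop 1).foldl pvB_inner (fields, cur ++ (pvSp1 seg).headD [])).2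
        (((pvSp1 seg).drop 1).foldl pvB_inner (fields, cur ++ (pvSp1 seg).headD [])).1 := by
  rw [pvB_seg]; simp [pvSplitOn_eq_sp1]

-- pushing one leading char of an even (outside-quotes) segment through pvB_seg
lemma pvConsChar (c : Char) (hseg : List Char) (t : List (List Char)) (inner : Bool)
    (cur : List Char) (fields : List String) :
    pvB_seg ((c :: hseg) :: t) inner cur fields =
      if c = ';' ∧ inner = false then pvB_seg (hseg :: t) inner [] (fields ++ [String.mk cur])
      else pvB_seg (hseg :: t) inner (cur ++ [c]) fields := by
  cases inner with
  | true =>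
    rw [if_neg (by simp), pvB_seg_cons_true, pvB_seg_cons_true]
    simp
  | false =>
    by_cases hc : c = ';'
    · subst hc
      rw [if_pos ⟨rfl, rfl⟩, pvB_seg_cons_false, pvB_seg_cons_false]
      rw [show pvSp1 (';' :: hseg) = [] :: pvSp1 hseg by rw [pvSp1]; simp]
      obtain ⟨p0, ps, hE⟩ := List.exists_cons_of_ne_nil (pvSp1_ne_nil hseg)
      rw [hE]
      simp [pvB_inner]
    · rw [if_neg (by simp [hc]), pvB_seg_cons_false, pvB_seg_cons_false]
      rw [pvSp1_cons c hseg (by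
        have : ¬(';' = c) := fun hx => hc hx.symm
        simp [List.isPrefixOf, this])]
      obtain ⟨p0, ps, hE⟩ := List.exists_cons_of_ne_nil (pvSp1_ne_nil hseg)
      rw [hE]
      simp

lemma pvMain : ∀ (n : Nat) (l : List Char), l.length ≤ n → ∀ inner cur fields,
    pvB_seg (pvSp2 l) inner cur fields = pvA_go l inner cur fields := by
  intro n
  induction n with
  | zero =>
    intro l hlen inner cur fields
    have : l = [] := by cases l <;> simp_all
    subst this
    cases inner <;>
      simp [pvSp2, pvSp1, pvB_seg_cons_true, pvB_seg_cons_false, pvB_seg, pvA_go]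
  | succ m ih =>
    intro l hlen inner cur fields
    cases l with
    | nil =>
      cases inner <;>
        simp [pvSp2, pvSp1, pvB_seg_cons_true, pvB_seg_cons_false, pvB_seg, pvA_go]
    | cons c rest =>
      rw [pvA_go]
      by_cases hq : c = '"' ∧ rest.head? = some '"'
      · rw [if_pos hq]
        obtain ⟨hc, hh⟩ := hq
        subst hc
        rcases rest with _ | ⟨c2, r⟩
        · simp at hh
        · simp at hh
          subst hh
          rw [show pvSp2 ('"' :: '"' :: r) = [] :: pvSp2 r by rw [pvSp2]; simp]
          have hr : r.length ≤ m := by simp at hlen; omega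
          cases inner with
          | true =>
            rw [pvB_seg_cons_true]
            simpa using ih r hr false cur fields
          | false =>
            rw [pvB_seg_cons_false]
            simpa [pvSp1, pvB_inner] using ih r hr true cur fields
      · rw [if_neg hq]
        have hnp : List.isPrefixOf ['"', '"'] (c :: rest) = false := by
          rcases rest with _ | ⟨c2, r⟩
          · simp [List.isPrefixOf]
          · by_contra hx
            simp [List.isPrefixOf] at hx
            exact hq ⟨hx.1.symm, by simp [hx.2.symm]⟩
        rw [pvSp2_cons c rest hnp]
        obtain ⟨h0, t0, hE⟩ := List.exists_cons_of_ne_nil (pvSp2_ne_nil rest)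
        rw [hE]
        have hr : rest.length ≤ m := by simp at hlen; omega
        rw [show (c :: (h0 :: t0).headD []) :: (h0 :: t0).tail = (c :: h0) :: t0 by simp]
        rw [pvConsChar]
        by_cases hsc : c = ';' ∧ inner = false
        · rw [if_pos hsc, if_pos hsc, ← hE, ih rest hr]
        · rw [if_neg hsc, if_neg hsc, ← hE, ih rest hr]

-- ===== VERDICT (by name: the statement is the Claim_ definition above) =====
theorem parse_ubs_row_a_py_spec : Claim_equal_parse_ubs_row_a_py := by
  intro line _
  unfold Spec_parse_ubs_row_a_py parse_ubs_row_a_py parse_ubs_row_a_py_alt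
  have hpro : pvB_prologue line = pvA_prologue line := rfl
  rw [hpro, pvSplitOn_eq_sp2]
  exact (pvMain (pvA_prologue line).length (pvA_prologue line) le_rfl false [] []).symm
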